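-- pv_equiv track=rewrite | github.com/ducdt1298/translate-renpy | src/preprocessing_file.py | remove_old_translate_content
-- ===== SOURCE A (Python) =====
-- def remove_old_translate_content(line):
--     is_start = False
--     start_index = 0
--     for i in range(len(line), 0, -1):
--         if line[i-1] == '"':
--             if not is_start:
--                 start_index = i
--                 is_start = True
--                 continue
--             if line[i-2] != '\\':
--                 return line[0:i] + line[start_index-1::]
-- ===== SOURCE B (Python) =====
-- def remove_old_translate_content(line):
--     # Forward pass: collect the indices of every double quote once, then pick
--     # the splice points from that index list instead of scanning backwards.
--     quotes = [i for i, ch in enumerate(line) if ch == '"']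
--     if not quotes:
--         return None
--     close = quotes[-1]
--     opens = [j for j in quotes[:-1] if line[j - 1] != '\\']
--     if not opens:
--         return None
--     return line[:opens[-1] + 1] + line[close:]
-- ===== Notes on version B (the rewrite author's own statement) =====
-- stated objective: alternative
-- what changed: Replaces A's stateful backward character scan (is_start/start_index flag machine with early return) by a forward pass that materialises the list of all quote indices once and then selects the splice points from that index list with comprehensions and list indexing.
import Mathlib
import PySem

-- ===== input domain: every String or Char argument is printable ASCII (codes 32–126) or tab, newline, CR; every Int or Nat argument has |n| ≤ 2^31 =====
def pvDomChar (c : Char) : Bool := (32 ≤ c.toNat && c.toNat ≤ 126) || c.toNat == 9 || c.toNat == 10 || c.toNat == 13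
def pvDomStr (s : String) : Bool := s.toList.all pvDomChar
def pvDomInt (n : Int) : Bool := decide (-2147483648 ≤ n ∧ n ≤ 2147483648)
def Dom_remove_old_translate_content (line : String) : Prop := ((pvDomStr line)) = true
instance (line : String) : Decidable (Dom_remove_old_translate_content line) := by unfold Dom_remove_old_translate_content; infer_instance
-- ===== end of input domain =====

-- B replaces A's stateful backward character scan with a forward pass that
-- collects all quote indices into a list and then selects the splice points
-- from that list; same cost, alternative structure; return values proved equal.

-- ===== PORT A =====
-- for i in range(len(line), 0, -1): python i = lean i' + 1, char index line[i-1] = cs[i'];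
-- state (is_start, start_index) threaded; early return via Option
def pvAGo (cs : List Char) : Nat → Bool → Int → Option String
  | 0, _, _ => none
  | i + 1, is_start, s =>
    if PySem.List.pyGet? cs (i : Int) == some '"' then      -- line[i-1] == '"'
      if !is_start then pvAGo cs i true ((i : Int) + 1)      -- start_index = i; is_start = True; continue
      else if PySem.List.pyGet? cs ((i : Int) - 1) != some '\\' then   -- line[i-2] != '\\' (wraps at -1, as Python)
        some (String.mk (PySem.List.slice cs (some 0) (some ((i : Int) + 1)) ++
                         PySem.List.slice cs (some (s - 1)) none))     -- line[0:i] + line[start_index-1::]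
      else pvAGo cs i is_start s
    else pvAGo cs i is_start s

def remove_old_translate_content (line : String) : Option String :=
  pvAGo line.toList line.toList.length false 0

-- ===== PORT B =====
-- quotes = [i for i, ch in enumerate(line) if ch == '"'] ; close = quotes[-1];
-- opens = [j for j in quotes[:-1] if line[j-1] != '\\'] ; return line[:opens[-1]+1] + line[close:]
def remove_old_translate_content_alt (line : String) : Option String :=
  let cs := line.toList
  let quotes : List Int := ((PySem.List.enumerate cs 0).filter (fun p => p.2 == '"')).map (·.1)
  match quotes.getLast? with
  | none => none                                            -- if not quotes: return None
  | some close =>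
    let opens := quotes.dropLast.filter (fun j => PySem.List.pyGet? cs (j - 1) != some '\\')
    match opens.getLast? with
    | none => none                                          -- if not opens: return None
    | some j => some (String.mk (PySem.List.slice cs none (some (j + 1)) ++
                                 PySem.List.slice cs (some close) none))

-- ===== PRECONDITION & SPEC =====
def Spec_remove_old_translate_content (line : String) (out : Option String) : Prop := out = remove_old_translate_content_alt line
instance (line : String) (out : Option String) : Decidable (Spec_remove_old_translate_content line out) := by unfold Spec_remove_old_translate_content; infer_instance

-- ===== CLAIM =====
def Claim_equal_remove_old_translate_content : Prop := ∀ (line : String), Dom_remove_old_translate_content line → Spec_remove_old_translate_content line (remove_old_translate_content line)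

-- ===== LEMMAS AND PROOFS =====

-- proof-side intermediate form of A's scan: last quote index, then backward search
def pvRfind (cs : List Char) : Nat → Int
  | 0 => -1
  | k + 1 => if PySem.List.pyGet? cs (k : Int) == some '"' then (k : Int) else pvRfind cs k

def pvBGo (cs : List Char) (close : Int) : Nat → Option String
  | 0 => none
  | i + 1 =>
    if (PySem.List.pyGet? cs (i : Int) == some '"') &&
       (PySem.List.pyGet? cs ((i : Int) - 1) != some '\\') then
      some (String.mk (PySem.List.slice cs none (some ((i : Int) + 1)) ++
                       PySem.List.slice cs (some close) none))
    else pvBGo cs close i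

lemma pvAGo_started (cs : List Char) (c : Nat) :
    ∀ i : Nat, pvAGo cs i true ((c : Int) + 1) = pvBGo cs (c : Int) i := by
  intro i
  induction i with
  | zero => simp [pvAGo, pvBGo]
  | succ i ih =>
    simp only [pvAGo, pvBGo]
    by_cases h1 : cs[i]? = some '"' <;>
      by_cases h2 : PySem.List.pyGet? cs ((i : Int) - 1) = some '\\' <;>
        simp [h1, h2, ih]

lemma pvAGo_unstarted (cs : List Char) :
    ∀ (i : Nat) (s : Int), pvAGo cs i false s =
      (if pvRfind cs i == -1 then none else pvBGo cs (pvRfind cs i) (pvRfind cs i).toNat) := by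
  intro i
  induction i with
  | zero => intro s; simp [pvAGo, pvRfind]
  | succ i ih =>
    intro s
    simp only [pvAGo, pvRfind]
    by_cases h1 : cs[i]? = some '"'
    · have hne : ((i : Int) = -1) = False := by simp
      simp [h1, hne, pvAGo_started cs i i]
    · simp [h1, ih s]

-- characterisation of B's quote list as a filtered range
lemma enumerate_quotes (cs : List Char) :
    ∀ s : Int, ((PySem.List.enumerate cs s).filter (fun p => p.2 == '"')).map (·.1) =
      ((List.range cs.length).filter (fun k => cs[k]? == some '"')).map (fun (k : Nat) => s + (k : Int)) := by
  induction cs with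
  | nil => intro s; simp [PySem.List.enumerate_nil]
  | cons c cs ih =>
    intro s
    have hshift : ((List.range cs.length).map Nat.succ).filter
        (fun k => (c :: cs)[k]? == some '"')
        = ((List.range cs.length).filter (fun k => cs[k]? == some '"')).map Nat.succ := by
      rw [List.filter_map]
      simp [Function.comp_def]
    have hfun : ∀ k : Nat, s + ((Nat.succ k : Nat) : Int) = (s + 1) + (k : Int) := by
      intro k; push_cast; ring
    rw [PySem.List.enumerate_cons, List.filter_cons, List.length_cons,
        List.range_succ_eq_map, List.filter_cons, hshift]
    by_cases hc : c = '"'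
    · subst hc
      simp only [beq_self_eq_true, if_pos, List.getElem?_cons_zero, List.map_cons]
      rw [ih (s + 1)]
      simp only [List.map_cons, List.map_map]
      refine List.cons_eq_cons.mpr ⟨by simp, ?_⟩
      refine List.map_congr_left ?_
      intro k _
      simp only [Function.comp_apply]
      push_cast; ring
    · have h1 : (c == '"') = false := by simp [hc]
      have h2 : ((c :: cs)[0]? == some '"') = false := by simp [hc]
      simp only [h1, h2, Bool.false_eq_true, if_false]
      rw [ih (s + 1)]
      simp only [List.map_map]
      refine List.map_congr_left ?_
      intro k _
      simp only [Function.comp_apply]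
      push_cast; ring

lemma pvRfind_eq (cs : List Char) :
    ∀ n : Nat, pvRfind cs n =
      (((List.range n).filter (fun k => cs[k]? == some '"')).getLast?).elim (-1) (fun (k : Nat) => (k : Int)) := by
  intro n
  induction n with
  | zero => simp [pvRfind]
  | succ n ih =>
    simp only [pvRfind, List.range_succ, List.filter_append, List.filter_cons]
    by_cases h : cs[n]? = some '"'
    · simp [h]
    · simp [h, ih]

lemma pvBGo_eq (cs : List Char) (close : Int) :
    ∀ i : Nat, pvBGo cs close i =
      (((List.range i).filter (fun (k : Nat) =>
          (cs[k]? == some '"') && (PySem.List.pyGet? cs ((k : Int) - 1) != some '\\'))).getLast?).map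
        (fun (j : Nat) => String.mk (PySem.List.slice cs none (some ((j : Int) + 1)) ++
                             PySem.List.slice cs (some close) none)) := by
  intro i
  induction i with
  | zero => simp [pvBGo]
  | succ i ih =>
    simp only [pvBGo, List.range_succ, List.filter_append, List.filter_cons]
    by_cases h1 : cs[i]? = some '"' <;>
      by_cases h2 : PySem.List.pyGet? cs ((i : Int) - 1) = some '\\' <;>
        simp [h1, h2, ih]

-- a filtered range splits at its last element
lemma filter_range_split (q : Nat → Bool) :
    ∀ (n c : Nat), ((List.range n).filter q).getLast? = some c →
      (List.range n).filter q = (List.range c).filter q ++ [c] := by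
  intro n
  induction n with
  | zero => intro c h; simp at h
  | succ n ih =>
    intro c h
    rw [List.range_succ, List.filter_append, List.filter_cons] at h ⊢
    by_cases hq : q n
    · rw [if_pos hq, List.filter_nil, List.getLast?_concat] at h
      rw [if_pos hq, List.filter_nil]
      cases h
      rfl
    · rw [if_neg hq, List.filter_nil, List.append_nil] at h
      rw [if_neg hq, List.filter_nil, List.append_nil]
      exact ih c h

-- ===== VERDICT =====
theorem remove_old_translate_content_spec : Claim_equal_remove_old_translate_content := by
  intro line _
  unfold Spec_remove_old_translate_content remove_old_translate_content remove_old_translate_content_alt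
  rw [pvAGo_unstarted line.toList line.toList.length 0]
  rw [pvRfind_eq]
  simp only []
  rw [enumerate_quotes line.toList 0]
  simp only [Int.zero_add]
  set cs := line.toList
  set q : Nat → Bool := fun k => cs[k]? == some '"' with hq
  cases hL : ((List.range cs.length).filter q).getLast? with
  | none => simp [hL]
  | some c =>
    have hsplit := filter_range_split q cs.length c hL
    have hc : (((List.range cs.length).filter q).map (fun (k : Nat) => (k : Int))).getLast? = some (c : Int) := by
      rw [List.getLast?_map, hL]; rfl
    have hne : (((c : Int)) == (-1 : Int)) = false := by simp
    simp only [Option.elim, hne, Bool.false_eq_true, if_false, hc]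
    have htoNat : ((c : Int)).toNat = c := Int.toNat_natCast c
    rw [htoNat, pvBGo_eq]
    -- B side: opens list
    have hdrop : (((List.range cs.length).filter q).map (fun (k : Nat) => (k : Int))).dropLast
        = ((List.range c).filter q).map (fun (k : Nat) => (k : Int)) := by
      rw [← List.map_dropLast, hsplit, List.dropLast_concat]
    rw [hdrop, List.filter_map]
    have hff : ((List.range c).filter q).filter
        ((fun j => PySem.List.pyGet? cs (j - 1) != some '\\') ∘ (fun (k : Nat) => (k : Int)))
        = (List.range c).filter (fun (k : Nat) =>
            (cs[k]? == some '"') && (PySem.List.pyGet? cs ((k : Int) - 1) != some '\\')) := by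
      rw [List.filter_filter]
      refine List.filter_congr ?_
      intro a _
      simp only [Function.comp_apply]
      rw [Bool.and_comm]
    rw [hff, List.getLast?_map]
    cases hP : ((List.range c).filter (fun (k : Nat) =>
        (cs[k]? == some '"') && (PySem.List.pyGet? cs ((k : Int) - 1) != some '\\'))).getLast? with
    | none => rfl
    | some j => rfl
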